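-- pv_equiv track=rewrite | github.com/jacobhaddad163-sys/ats-recap-report | utils/ats_parser.py | _sort_sheets_for_processing
-- ===== SOURCE A (Python) =====
-- from typing import Dict, List
--
-- SHEET_BRAND_MAP = {
--     "LONG BOTTOMS": "NIKE LONG BOTTOMS",
--     "BOTTOMS": "NIKE LONG BOTTOMS",
--     "NIKE TEES": "NIKE TEES",
--     "JORDAN TEES": "JORDAN TEES",
-- }
--
-- BRAND_ORDER = ["NIKE LONG BOTTOMS", "NIKE TEES", "JORDAN TEES"]
--
-- def map_sheet_to_brand(sheet_name: str) -> str: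
--     """Map a sheet name to a specific brand label using known mappings.
--
--     Returns the mapped brand label if found, otherwise returns empty string
--     (caller should fall back to detect_brand).
--     """
--     sn = sheet_name.upper().strip()
--     # Check exact matches first
--     if sn in SHEET_BRAND_MAP:
--         return SHEET_BRAND_MAP[sn]
--     # Check if sheet name contains known brand+category combos
--     for key, brand_label in SHEET_BRAND_MAP.items():
--         if key in sn:
--             return brand_label
--     return ""
--
-- def _sort_sheets_for_processing(sheet_names: List[str]) -> List[str]:
--     """Sort sheets so known brands come in the desired order.
--
--     Order: NIKE LONG BOTTOMS first, then NIKE TEES, then JORDAN TEES,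
--     then any remaining sheets in original order.
--     """
--     ordered = []
--     remaining = list(sheet_names)
--
--     for brand_label in BRAND_ORDER:
--         for sn in list(remaining):
--             mapped = map_sheet_to_brand(sn)
--             if mapped == brand_label:
--                 ordered.append(sn)
--                 remaining.remove(sn)
--
--     # Append any sheets that didn't match a known brand order
--     ordered.extend(remaining)
--     return ordered
-- ===== SOURCE B (Python) =====
-- from typing import Dict, List
--
-- SHEET_BRAND_MAP = {
--     "LONG BOTTOMS": "NIKE LONG BOTTOMS",
--     "BOTTOMS": "NIKE LONG BOTTOMS",
--     "NIKE TEES": "NIKE TEES",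
--     "JORDAN TEES": "JORDAN TEES",
-- }
--
-- BRAND_ORDER = ["NIKE LONG BOTTOMS", "NIKE TEES", "JORDAN TEES"]
--
-- def map_sheet_to_brand(sheet_name: str) -> str:
--     sn = sheet_name.upper().strip()
--     if sn in SHEET_BRAND_MAP:
--         return SHEET_BRAND_MAP[sn]
--     return next((label for key, label in SHEET_BRAND_MAP.items() if key in sn), "")
--
-- def _sort_sheets_for_processing(sheet_names: List[str]) -> List[str]:
--     # Map each sheet once, then take each brand's sheets (original order) followed by leftovers.
--     pairs = [(sn, map_sheet_to_brand(sn)) for sn in sheet_names]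
--     ordered = [sn for brand in BRAND_ORDER for sn, m in pairs if m == brand]
--     ordered += [sn for sn, m in pairs if m not in BRAND_ORDER]
--     return ordered
-- ===== Notes on version B (the rewrite author's own statement) =====
-- stated objective: alternative
-- what changed: Replaces A's per-brand scan-and-remove over a mutating 'remaining' list (each list.remove is a linear scan and the brand mapping is recomputed on every pass) with one pass that maps each sheet to its brand once, then concatenates per-brand groups and leftovers.
import Mathlib
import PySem

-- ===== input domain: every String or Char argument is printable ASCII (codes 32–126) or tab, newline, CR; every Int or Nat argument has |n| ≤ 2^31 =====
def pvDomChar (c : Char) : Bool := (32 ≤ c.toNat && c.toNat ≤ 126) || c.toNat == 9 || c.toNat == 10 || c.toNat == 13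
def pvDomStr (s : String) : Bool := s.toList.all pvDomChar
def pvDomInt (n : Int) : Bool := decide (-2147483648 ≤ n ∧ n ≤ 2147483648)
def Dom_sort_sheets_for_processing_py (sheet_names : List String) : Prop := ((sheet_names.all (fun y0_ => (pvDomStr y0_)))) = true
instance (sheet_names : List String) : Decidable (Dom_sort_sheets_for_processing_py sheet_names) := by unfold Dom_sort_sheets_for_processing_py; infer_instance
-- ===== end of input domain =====

-- ===== PORT A =====
-- B maps each sheet to its brand once and concatenates per-brand groups, replacing A's
-- per-brand scan-and-remove passes over a mutating list — alternative, same observable result.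
-- Shared module context: SHEET_BRAND_MAP, BRAND_ORDER and the helper map_sheet_to_brand (called by both A and B).
def pvSheetBrandMap : List (String × String) :=
  [("LONG BOTTOMS", "NIKE LONG BOTTOMS"), ("BOTTOMS", "NIKE LONG BOTTOMS"),
   ("NIKE TEES", "NIKE TEES"), ("JORDAN TEES", "JORDAN TEES")]

def pvBrandOrder : List String := ["NIKE LONG BOTTOMS", "NIKE TEES", "JORDAN TEES"]

-- map_sheet_to_brand: exact dict lookup first, else first key that is a substring of sn, else "".
def map_sheet_to_brand_py (sheet_name : String) : String :=
  let sn := PySem.Str.strip (PySem.Str.upper sheet_name)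
  match (PySem.Dict.ofList pvSheetBrandMap).get? sn with
  | some v => v
  | none =>
    (pvSheetBrandMap.findSome? (fun kv =>
      if PySem.Str.isIn kv.1 sn then some kv.2 else none)).getD ""

-- A: for each brand, scan a snapshot of `remaining`, appending matches to `ordered` and
-- removing them from `remaining` (list.remove = remove first occurrence; always present here,
-- so the getD fallback is never taken).
def sort_sheets_for_processing_py (sheet_names : List String) : List String :=
  let st := pvBrandOrder.foldl (fun (st : List String × List String) brand_label =>
      st.2.foldl (fun (st2 : List String × List String) sn =>
        if map_sheet_to_brand_py sn == brand_label then
          (st2.1 ++ [sn], (PySem.List.remove? st2.2 sn).getD st2.2)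
        else st2) st) ([], sheet_names)
  st.1 ++ st.2

-- ===== PORT B =====
-- B: map each sheet once into (sheet, brand) pairs, then per-brand comprehensions + leftovers.
def sort_sheets_for_processing_py_alt (sheet_names : List String) : List String :=
  let pairs := sheet_names.map (fun sn => (sn, map_sheet_to_brand_py sn))
  let ordered := pvBrandOrder.flatMap (fun brand =>
      (pairs.filter (fun p => p.2 == brand)).map (fun p => p.1))
  ordered ++ (pairs.filter (fun p => !(pvBrandOrder.contains p.2))).map (fun p => p.1)

-- ===== PRECONDITION & SPEC =====
def Spec_sort_sheets_for_processing_py (sheet_names : List String) (out : List String) : Prop := out = sort_sheets_for_processing_py_alt sheet_names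
instance (sheet_names : List String) (out : List String) : Decidable (Spec_sort_sheets_for_processing_py sheet_names out) := by unfold Spec_sort_sheets_for_processing_py; infer_instance

-- ===== CLAIM (what is proved, stated in full; the proofs are below) =====
def Claim_equal_sort_sheets_for_processing_py : Prop := ∀ (sheet_names : List String), Dom_sort_sheets_for_processing_py sheet_names → Spec_sort_sheets_for_processing_py sheet_names (sort_sheets_for_processing_py sheet_names)

-- ===== LEMMAS AND PROOFS =====

-- A's inner loop over a snapshot `c` of `remaining` is a stable partition by `map = b`;
-- `pre` is the already-kept non-matching prefix of `remaining` (so removal always hits `c`).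
lemma inner_loop_eq (b : String) (c : List String) :
    ∀ (pre ord : List String), (∀ y ∈ pre, map_sheet_to_brand_py y ≠ b) →
    c.foldl (fun (st2 : List String × List String) sn =>
        if map_sheet_to_brand_py sn == b then
          (st2.1 ++ [sn], (PySem.List.remove? st2.2 sn).getD st2.2)
        else st2) (ord, pre ++ c)
      = (ord ++ c.filter (fun sn => map_sheet_to_brand_py sn == b),
         pre ++ c.filter (fun sn => !(map_sheet_to_brand_py sn == b))) := by
  induction c with
  | nil => intro pre ord h; simp
  | cons x c' ih =>
    intro pre ord h
    simp only [List.foldl_cons]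
    by_cases hx : map_sheet_to_brand_py x = b
    · have hnp : x ∉ pre := fun hm => h x hm hx
      rw [if_pos (by simp [hx])]
      rw [show PySem.List.remove? (ord, pre ++ x :: c').2 x = some (pre ++ c') by
            rw [PySem.List.remove?_eq_some_erase _ x (by simp), List.erase_append_right _ hnp]
            simp]
      simp only [Option.getD_some]
      rw [ih pre (ord ++ [x]) h]
      simp [hx]
    · rw [if_neg (by simp [hx])]
      have := ih (pre ++ [x]) ord (by intro y hy; rcases List.mem_append.1 hy with h1 | h1
                                      · exact h y h1
                                      · simp at h1; subst h1; exact hx)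
      simp only [List.append_assoc, List.cons_append, List.nil_append] at this
      rw [this]
      simp [hx]

-- the inner loop as started by A: snapshot = current remaining (pre = []).
lemma inner0 (b : String) (c ord : List String) :
    c.foldl (fun (st2 : List String × List String) sn =>
        if map_sheet_to_brand_py sn == b then
          (st2.1 ++ [sn], (PySem.List.remove? st2.2 sn).getD st2.2)
        else st2) (ord, c)
      = (ord ++ c.filter (fun sn => map_sheet_to_brand_py sn == b),
         c.filter (fun sn => !(map_sheet_to_brand_py sn == b))) := by
  simpa using inner_loop_eq b c [] ord (by simp)

-- removing another brand's sheets first does not change a brand's filter.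
lemma filter_of_filter_not (b b' : String) (hbb : b' ≠ b) (l : List String) :
    (l.filter (fun sn => !(map_sheet_to_brand_py sn == b'))).filter
        (fun sn => map_sheet_to_brand_py sn == b)
      = l.filter (fun sn => map_sheet_to_brand_py sn == b) := by
  rw [List.filter_filter]
  apply List.filter_congr
  intro sn _
  by_cases h : map_sheet_to_brand_py sn = b <;> simp [h, Ne.symm hbb]

lemma filter_comm3 {α : Type} (p q r : α → Bool) (l : List α) :
    List.filter r (List.filter q (List.filter p l))
      = List.filter p (List.filter q (List.filter r l)) := by
  simp only [List.filter_filter]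
  apply List.filter_congr
  intro a _
  cases p a <;> cases q a <;> cases r a <;> rfl

-- ===== VERDICT (by name: the statement is the Claim_ definition above) =====
theorem sort_sheets_for_processing_py_spec : Claim_equal_sort_sheets_for_processing_py := by
  intro l _
  unfold Spec_sort_sheets_for_processing_py
  unfold sort_sheets_for_processing_py sort_sheets_for_processing_py_alt pvBrandOrder
  simp only [List.foldl_cons, List.foldl_nil, inner0, List.flatMap_cons, List.flatMap_nil,
    List.filter_map, List.map_map]
  simp only [Function.comp_def, List.map_id_fun', List.nil_append, List.append_nil,
    List.contains_cons, List.contains_nil, Bool.or_false, Bool.not_or, ← List.filter_filter]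
  rw [filter_of_filter_not "NIKE TEES" "NIKE LONG BOTTOMS" (by decide),
      filter_of_filter_not "JORDAN TEES" "NIKE TEES" (by decide),
      filter_of_filter_not "JORDAN TEES" "NIKE LONG BOTTOMS" (by decide)]
  rw [filter_comm3]
  simp only [id_eq, List.append_assoc]
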